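-- pv_equiv track=rewrite | github.com/DragunWF/Competitive-Programming | CodeWars/python/6_kyu/digit_racers.py | digit_racers
-- ===== SOURCE A (Python) =====
-- from collections import Counter
-- from string import digits
--
-- def digit_racers(s: str) -> str:
--     counter = Counter(s)
--     placements: list[list[int]] = []
--     last_count = None
--     for key in sorted(counter, key=counter.get, reverse=True):
--         count = counter[key]
--         if count != last_count:
--             placements.append([key])
--         else:
--             placements[-1].append(key)
--         last_count = count
--
--     for placement in placements:
--         placement.sort(key=lambda digit: get_last_index(
--             s, digit), reverse=True)
--
--     return format_placements(placements)
--
-- def get_last_index(s: str, digit: str) -> int: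
--     for i in range(len(s) - 1, 0, -1):
--         if s[i] == digit:
--             return i
--     return 0
--
-- def format_placements(placements: list[list[int]]) -> str:
--     output = []
--     seen_digits = set()
--     for i, placement in enumerate(placements):
--         ordinal = None
--         placement_count = i + 1
--         if placement_count == 1:
--             ordinal = "st"
--         elif placement_count == 2:
--             ordinal = "nd"
--         elif placement_count == 3:
--             ordinal = "rd"
--         else:
--             ordinal = "th"
--         output.append(
--             f"{placement_count}{ordinal} place: {', '.join(placement)}")
--
--         for digit in placement:
--             seen_digits.add(digit)
--
--     absent_digits = get_absent_digits(seen_digits)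
--     output.append(
--         f"Absent digits: {', '.join(absent_digits)}" if absent_digits else "All digits present"
--     )
--
--     return "\n".join(output)
--
-- def get_absent_digits(seen_digits: set) -> list:
--     absent_digits = []
--     for digit in digits:
--         if not digit in seen_digits:
--             absent_digits.append(digit)
--     return absent_digits
-- ===== SOURCE B (Python) =====
-- from string import digits
--
--
-- def digit_racers(s: str) -> str:
--     # Sort-free counting approach: deduplicating the reversed string yields the
--     # distinct characters already ordered by last occurrence (descending), so the
--     # tie-break order costs nothing; characters are then distributed into buckets
--     # keyed by their frequency, and ranks are emitted by counting down from the
--     # maximum frequency (a counting sort over the counts), never calling sorted().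
--     order = []
--     for c in reversed(s):
--         if c not in order:
--             order.append(c)
--     count = {c: s.count(c) for c in order}
--     top = max(count.values(), default=0)
--     buckets = {}
--     for c in order:
--         buckets.setdefault(count[c], []).append(c)
--     lines = []
--     rank = 0
--     for n in range(top, 0, -1):
--         if n in buckets:
--             rank += 1
--             suf = {1: "st", 2: "nd", 3: "rd"}.get(rank, "th")
--             lines.append(f"{rank}{suf} place: {', '.join(buckets[n])}")
--     absent = [d for d in digits if d not in count]
--     lines.append(f"Absent digits: {', '.join(absent)}" if absent else "All digits present")
--     return "\n".join(lines)
-- ===== Notes on version B (the rewrite author's own statement) =====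
-- stated objective: alternative
-- what changed: A sorts the Counter keys by frequency, splits adjacent equal-count runs with a trailing last_count, and re-sorts each run by a per-character backward get_last_index scan; B never sorts: deduplicating the reversed string yields the characters already in last-occurrence-descending order, they are distributed into frequency buckets, and ranks are emitted by a counting-sort countdown from the maximum frequency.
import Mathlib
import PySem

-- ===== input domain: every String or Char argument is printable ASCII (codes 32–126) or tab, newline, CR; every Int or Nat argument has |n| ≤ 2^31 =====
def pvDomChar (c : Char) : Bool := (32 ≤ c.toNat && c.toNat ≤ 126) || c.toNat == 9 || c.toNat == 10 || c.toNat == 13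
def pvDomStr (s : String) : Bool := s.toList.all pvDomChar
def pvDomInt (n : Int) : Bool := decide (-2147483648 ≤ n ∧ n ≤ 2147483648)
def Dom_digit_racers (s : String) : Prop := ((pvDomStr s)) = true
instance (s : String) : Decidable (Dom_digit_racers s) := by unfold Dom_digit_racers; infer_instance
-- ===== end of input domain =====

-- B replaces Counter + stable sorts + per-char backward scans by a sort-free counting scheme:
-- dedup of the reversed string gives the tie order for free, chars are bucketed by frequency
-- and ranks emitted by counting down from the top count (objective: alternative; same output).


-- ===== PORT A =====
-- grouping loop body: placements / last_count  (placements[-1].append(key): the else-branch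
-- only runs with last_count already equal to count, so placements is nonempty there; getLastD
-- is its total rendering)
def pvGrpStep (f : Char → Int) (st : List (List Char) × Option Int) (key : Char) :
    List (List Char) × Option Int :=
  let count := f key
  if some count ≠ st.2 then (st.1 ++ [[key]], some count)
  else (st.1.dropLast ++ [st.1.getLastD [] ++ [key]], some count)

-- get_last_index: scan i = len-1 .. 1, return first i with s[i] == digit, else 0
def pvGetLastIndexA (cs : List Char) (digit : Char) : Int :=
  ((PySem.List.pyRange ((cs.length : Int) - 1) 0 (-1)).find?
      (fun i => PySem.List.pyGetD cs i ' ' == digit)).getD 0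

def pvGetAbsentDigitsA (seen : PySem.Set Char) : List Char :=
  ("0123456789".toList).foldl (fun acc d => if !(seen.contains d) then acc ++ [d] else acc) []

-- one output line of format_placements (the f-string with the ordinal if-chain)
def pvLineA (p : Int × List Char) : List Char :=
  let placementCount := p.1 + 1
  let ordinal := if placementCount = 1 then "st".toList else if placementCount = 2 then "nd".toList
    else if placementCount = 3 then "rd".toList else "th".toList
  PySem.Int.toChars placementCount ++ ordinal ++ " place: ".toList
    ++ PySem.Chars.join ", ".toList (p.2.map (fun c => [c]))

def pvFormatPlacementsA (placements : List (List Char)) : String :=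
  let st := (PySem.List.enumerate placements 0).foldl
    (fun (st : List (List Char) × PySem.Set Char) p =>
      (st.1 ++ [pvLineA p], List.foldl PySem.Set.add st.2 p.2))
    ([], ([] : PySem.Set Char))
  let absent := pvGetAbsentDigitsA st.2
  let output := st.1 ++ [if absent ≠ [] then
      "Absent digits: ".toList ++ PySem.Chars.join ", ".toList (absent.map (fun c => [c]))
    else "All digits present".toList]
  String.ofList (PySem.Chars.join "\n".toList output)

def digit_racers (s : String) : String :=
  let cs := s.toList
  let counter := PySem.Dict.counter cs
  let sortedKeys := PySem.List.sorted counter.keys (fun k => counter.getD k 0) true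
  let st := sortedKeys.foldl (pvGrpStep (fun k => counter.getD k 0)) ([], (none : Option Int))
  let placements := st.1.map (fun pl => PySem.List.sorted pl (fun d => pvGetLastIndexA cs d) true)
  pvFormatPlacementsA placements

-- ===== PORT B =====
-- {1:"st",2:"nd",3:"rd"}.get(rank,"th")
def pvSufB (rank : Int) : List Char :=
  (PySem.Dict.ofList [((1 : Int), "st".toList), (2, "nd".toList), (3, "rd".toList)]).getD
    rank "th".toList

def pvLineB (rank : Int) (group : List Char) : List Char :=
  PySem.Int.toChars rank ++ pvSufB rank ++ " place: ".toList
    ++ PySem.Chars.join ", ".toList (group.map (fun c => [c]))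

def digit_racers_alt (s : String) : String :=
  let cs := s.toList
  -- for c in reversed(s): if c not in order: order.append(c)
  let order := cs.reverse.foldl
    (fun (acc : List Char) c => if acc.contains c then acc else acc ++ [c]) []
  -- count = {c: s.count(c) for c in order}
  let countD := order.foldl
    (fun (d : PySem.Dict Char Int) c => d.insert c ((PySem.Chars.count cs [c] : Int)))
    PySem.Dict.empty
  -- top = max(count.values(), default=0)
  let top := PySem.List.maxD countD.values (fun v => v) 0
  -- buckets.setdefault(count[c], []).append(c)
  let buckets := order.foldl
    (fun (d : PySem.Dict Int (List Char)) c => d.modify (countD.getD c 0) [] (· ++ [c]))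
    PySem.Dict.empty
  -- for n in range(top, 0, -1): if n in buckets: rank += 1; emit line
  let st := (PySem.List.pyRange top 0 (-1)).foldl
    (fun (st : List (List Char) × Int) n =>
      if buckets.contains n then (st.1 ++ [pvLineB (st.2 + 1) (buckets.getD n [])], st.2 + 1)
      else st)
    ([], (0 : Int))
  let absent := "0123456789".toList.filter (fun d => !(countD.contains d))
  let lines := st.1 ++ [if absent ≠ [] then
      "Absent digits: ".toList ++ PySem.Chars.join ", ".toList (absent.map (fun c => [c]))
    else "All digits present".toList]
  String.ofList (PySem.Chars.join "\n".toList lines)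

-- ===== PRECONDITION & SPEC =====
def Spec_digit_racers (s : String) (out : String) : Prop := out = digit_racers_alt s
instance (s : String) (out : String) : Decidable (Spec_digit_racers s out) := by unfold Spec_digit_racers; infer_instance

-- ===== CLAIM (what is proved, stated in full; the proofs are below) =====
def Claim_equal_digit_racers : Prop := ∀ (s : String), Dom_digit_racers s → Spec_digit_racers s (digit_racers s)

-- ===== LEMMAS AND PROOFS =====

-- last dict of a forward enumerate pass (the value A's get_last_index computes)
def pvLastD (cs : List Char) : PySem.Dict Char Int :=
  (PySem.List.enumerate cs 0).foldl (fun d p => d.insert p.2 p.1) PySem.Dict.empty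

-- concatenation of the equal-count blocks, in the order of vs
def pvBlocks (f : Char → Int) (vs : List Int) (xs : List Char) : List Char :=
  vs.flatMap (fun n => xs.filter (fun c => f c == n))

-- insert a value into a strictly descending list (no-op if already present)
def pvInsDesc (v : Int) : List Int → List Int
  | [] => [v]
  | n :: t => if n < v then v :: n :: t else if v = n then n :: t else n :: pvInsDesc v t

-- the common normal form of both outputs
def pvRender (G : List (List Char)) : String :=
  let lines := (PySem.List.enumerate G 0).map pvLineA
  let seen := G.foldl PySem.Set.update ([] : PySem.Set Char)
  let absent := "0123456789".toList.filter (fun d => !(seen.contains d))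
  String.ofList (PySem.Chars.join "\n".toList (lines ++ [if absent ≠ [] then
      "Absent digits: ".toList ++ PySem.Chars.join ", ".toList (absent.map (fun c => [c]))
    else "All digits present".toList]))

-- the group of count n: its distinct chars sorted by last index descending
def pvGB (cs : List Char) (n : Int) : List Char :=
  PySem.List.sorted ((PySem.Set.ofList cs).filter (fun c => (List.count c cs : Int) == n))
    (fun c => (pvLastD cs).getD c 0) true

-- the groups both programs produce: distinct counts descending, each sorted by last index descending
def pvGroups (cs : List Char) : List (List Char) :=
  (PySem.List.sorted (PySem.Set.ofList ((PySem.Set.ofList cs).map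
      (fun c => (List.count c cs : Int)))) (fun n => n) true).map (pvGB cs)

lemma pv_find?_congr {α : Type} (l : List α) (p q : α → Bool) (h : ∀ a ∈ l, p a = q a) :
    l.find? p = l.find? q := by
  induction l with
  | nil => rfl
  | cons a t ih =>
    have ha := h a (by simp)
    rw [List.find?_cons, List.find?_cons, ha]
    cases q a with
    | true => rfl
    | false => exact ih (fun b hb => h b (by simp [hb]))

lemma pv_insertBy_append_not {α : Type} (before : α → α → Bool) (x : α) (as bs : List α)
    (h : ∀ a ∈ as, before x a = false) :
    PySem.List.insertBy before x (as ++ bs) = as ++ PySem.List.insertBy before x bs := by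
  induction as with
  | nil => rfl
  | cons a t ih =>
    have ha : before x a = false := h a (by simp)
    simp only [List.cons_append, PySem.List.insertBy, ha]
    simp [ih (fun b hb => h b (by simp [hb]))]

lemma pv_insertBy_all_before {α : Type} (before : α → α → Bool) (x : α) (ys : List α)
    (h : ∀ y ∈ ys, before x y = true) :
    PySem.List.insertBy before x ys = x :: ys := by
  cases ys with
  | nil => rfl
  | cons y t => simp [PySem.List.insertBy, h y (by simp)]

lemma pv_mem_insDesc (v m : Int) (vs : List Int) : m ∈ pvInsDesc v vs ↔ m = v ∨ m ∈ vs := by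
  induction vs with
  | nil => simp [pvInsDesc]
  | cons n t ih =>
    simp only [pvInsDesc]
    split_ifs with h1 h2
    · simp [List.mem_cons]
    · subst h2; simp [List.mem_cons]
    · simp only [List.mem_cons, ih]; tauto

lemma pv_insDesc_pairwise (v : Int) (vs : List Int) (h : vs.Pairwise (· > ·)) :
    (pvInsDesc v vs).Pairwise (· > ·) := by
  induction vs with
  | nil => simp [pvInsDesc]
  | cons n t ih =>
    rw [List.pairwise_cons] at h
    obtain ⟨hn, ht⟩ := h
    simp only [pvInsDesc]
    split_ifs with h1 h2
    · refine List.pairwise_cons.2 ⟨?_, List.pairwise_cons.2 ⟨hn, ht⟩⟩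
      intro m hm
      rcases List.mem_cons.1 hm with rfl | hm
      · exact h1
      · exact lt_trans (hn m hm) h1
    · exact List.pairwise_cons.2 ⟨hn, ht⟩
    · refine List.pairwise_cons.2 ⟨?_, ih ht⟩
      intro m hm
      rcases (pv_mem_insDesc v m t).1 hm with rfl | hm
      · omega
      · exact hn m hm

lemma pv_insDesc_of_mem (v : Int) (vs : List Int) (h : vs.Pairwise (· > ·)) (hv : v ∈ vs) :
    pvInsDesc v vs = vs := by
  induction vs with
  | nil => simp at hv
  | cons n t ih =>
    rw [List.pairwise_cons] at h
    simp only [pvInsDesc]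
    rcases List.mem_cons.1 hv with rfl | hv
    · simp
    · have hnv : v < n := h.1 v hv
      rw [if_neg (by omega), if_neg (by omega), ih h.2 hv]

lemma pv_insDesc_perm (v : Int) (vs : List Int) (hv : v ∉ vs) :
    (pvInsDesc v vs).Perm (vs ++ [v]) := by
  induction vs with
  | nil => simp [pvInsDesc]
  | cons n t ih =>
    have hv1 : v ≠ n := fun h => hv (by simp [h])
    have hv2 : v ∉ t := fun h => hv (by simp [h])
    simp only [pvInsDesc]
    split_ifs with h1
    · exact (List.perm_append_singleton _ _).symm
    · simpa using (ih hv2).cons n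

lemma pv_blocks_cons (f : Char → Int) (n : Int) (vs : List Int) (xs : List Char) :
    pvBlocks f (n :: vs) xs = xs.filter (fun c => f c == n) ++ pvBlocks f vs xs := by
  simp [pvBlocks]

lemma pv_mem_blocks (f : Char → Int) (vs : List Int) (xs : List Char) (y : Char)
    (hy : y ∈ pvBlocks f vs xs) : f y ∈ vs := by
  simp only [pvBlocks, List.mem_flatMap, List.mem_filter] at hy
  obtain ⟨n, hn, _, he⟩ := hy
  exact (by simpa using he : f y = n) ▸ hn

lemma pv_blocks_append_notmem (f : Char → Int) (vs : List Int) (xs : List Char) (x : Char)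
    (hx : f x ∉ vs) : pvBlocks f vs (xs ++ [x]) = pvBlocks f vs xs := by
  induction vs with
  | nil => rfl
  | cons n t ih =>
    simp only [pvBlocks, List.flatMap_cons] at *
    rw [List.filter_append]
    have hxn : List.filter (fun c => f c == n) [x] = [] := by
      simp only [List.filter_cons, List.filter_nil]
      have : ¬ (f x = n) := fun h => hx (by simp [h])
      simp [this]
    rw [hxn, List.append_nil, ih (fun h => hx (by simp [h]))]

lemma pv_insertBy_blocks (f : Char → Int) (x : Char) (vs : List Int) (xs : List Char)
    (hp : vs.Pairwise (· > ·))
    (hfx : f x ∉ vs → xs.filter (fun c => f c == f x) = []) :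
    PySem.List.insertBy (fun a b => decide (f b < f a)) x (pvBlocks f vs xs)
      = pvBlocks f (pvInsDesc (f x) vs) (xs ++ [x]) := by
  induction vs with
  | nil =>
    have hxs : xs.filter (fun c => f c == f x) = [] := hfx (by simp)
    simp [pvBlocks, pvInsDesc, PySem.List.insertBy, List.filter_append, hxs]
  | cons n t ih =>
    have hpt : t.Pairwise (· > ·) := (List.pairwise_cons.1 hp).2
    have hnt : ∀ m ∈ t, m < n := fun m hm => (List.pairwise_cons.1 hp).1 m hm
    rcases lt_trichotomy n (f x) with h1 | h2 | h3
    · -- f x is a new maximum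
      have hfxnotin : f x ∉ n :: t := by
        intro hmem
        rcases List.mem_cons.1 hmem with he | hmem
        · omega
        · have := hnt _ hmem; omega
      have hxs : xs.filter (fun c => f c == f x) = [] := hfx hfxnotin
      have hall : ∀ y ∈ pvBlocks f (n :: t) xs, (decide (f y < f x)) = true := by
        intro y hy
        have hmy := pv_mem_blocks f _ _ _ hy
        rcases List.mem_cons.1 hmy with he | hmem
        · simp [he, h1]
        · have := hnt _ hmem; simp; omega
      rw [pv_insertBy_all_before _ _ _ hall]
      have hfil : (xs ++ [x]).filter (fun c => f c == f x) = [x] := by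
        rw [List.filter_append, hxs]; simp
      have hins : pvInsDesc (f x) (n :: t) = f x :: n :: t := by
        simp only [pvInsDesc, if_pos h1]
      rw [hins]
      have hR : pvBlocks f (f x :: n :: t) (xs ++ [x]) = x :: pvBlocks f (n :: t) xs := by
        rw [pv_blocks_cons f (f x) (n :: t) (xs ++ [x]),
            pv_blocks_append_notmem f (n :: t) xs x hfxnotin, hfil]
        rfl
      rw [hR]
    · -- equal count: x joins the head block at its end
      subst h2
      have hfxt : f x ∉ t := fun hm => by have := hnt _ hm; omega
      have hBn : ∀ y ∈ xs.filter (fun c => f c == f x), (decide (f y < f x)) = false := by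
        intro y hy
        have hfy : f y = f x := by simpa using (List.mem_filter.1 hy).2
        simp [hfy]
      rw [pv_blocks_cons, pv_insertBy_append_not _ _ _ _ hBn]
      have hrest : ∀ y ∈ pvBlocks f t xs, (decide (f y < f x)) = true := by
        intro y hy
        have := hnt _ (pv_mem_blocks f _ _ _ hy)
        simp; omega
      rw [pv_insertBy_all_before _ _ _ hrest]
      have hins : pvInsDesc (f x) (f x :: t) = f x :: t := by
        simp [pvInsDesc]
      rw [hins]
      have hfil : (xs ++ [x]).filter (fun c => f c == f x)
          = xs.filter (fun c => f c == f x) ++ [x] := by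
        rw [List.filter_append]; simp
      have hR : pvBlocks f (f x :: t) (xs ++ [x])
          = xs.filter (fun c => f c == f x) ++ [x] ++ pvBlocks f t xs := by
        rw [pv_blocks_cons f (f x) t (xs ++ [x]), pv_blocks_append_notmem f t xs x hfxt, hfil]
      rw [hR]
      simp
    · -- smaller count: skip the head block, recurse
      have hBn : ∀ y ∈ xs.filter (fun c => f c == n), (decide (f y < f x)) = false := by
        intro y hy
        have hfy : f y = n := by simpa using (List.mem_filter.1 hy).2
        simp [hfy]; omega
      rw [pv_blocks_cons, pv_insertBy_append_not _ _ _ _ hBn]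
      have hfx' : f x ∉ t → xs.filter (fun c => f c == f x) = [] := by
        intro hh
        refine hfx ?_
        intro hm
        rcases List.mem_cons.1 hm with he | hm
        · omega
        · exact hh hm
      rw [ih hpt hfx']
      have hins : pvInsDesc (f x) (n :: t) = n :: pvInsDesc (f x) t := by
        simp only [pvInsDesc]
        rw [if_neg (by omega), if_neg (by omega)]
      rw [hins]
      have hfiln : (xs ++ [x]).filter (fun c => f c == n) = xs.filter (fun c => f c == n) := by
        rw [List.filter_append]
        have hne2 : ¬ (f x = n) := by omega
        simp [hne2]
      have hR : pvBlocks f (n :: pvInsDesc (f x) t) (xs ++ [x])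
          = xs.filter (fun c => f c == n) ++ pvBlocks f (pvInsDesc (f x) t) (xs ++ [x]) := by
        rw [pv_blocks_cons, hfiln]
      rw [hR]

lemma pv_ofList_append_int (l : List Int) (a : Int) :
    PySem.Set.ofList (l ++ [a]) = PySem.Set.add (PySem.Set.ofList l) a := by
  simp only [PySem.Set.ofList, List.foldl_append, List.foldl_cons, List.foldl_nil]

lemma pv_sorted_desc_pairwise_gt (S : List Int) (hS : S.Nodup) :
    (PySem.List.sorted S (fun n => n) true).Pairwise (· > ·) := by
  have h1 := PySem.List.sorted_pairwise_rev S (fun n => n)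
  have h2 : (PySem.List.sorted S (fun n => n) true).Nodup :=
    ((PySem.List.sorted_perm S (fun n => n) true).nodup_iff).2 hS
  exact (h1.and h2).imp (fun h => lt_of_le_of_ne h.1 (Ne.symm h.2))

lemma pv_sorted_desc_eq_blocks (f : Char → Int) (xs : List Char) :
    PySem.List.sorted xs f true
      = pvBlocks f (PySem.List.sorted (PySem.Set.ofList (xs.map f)) (fun n => n) true) xs := by
  induction xs using List.reverseRecOn with
  | nil => rfl
  | append_singleton ys x ih =>
    have hfold := PySem.List.sorted_rev_eq_foldl_insertBy (ys ++ [x]) f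
    rw [List.foldl_append] at hfold
    simp only [List.foldl_cons, List.foldl_nil] at hfold
    rw [← PySem.List.sorted_rev_eq_foldl_insertBy ys f] at hfold
    rw [hfold, ih]
    have hnd : (PySem.Set.ofList (ys.map f)).Nodup := PySem.Set.nodup_ofList _
    have hpV := pv_sorted_desc_pairwise_gt _ hnd
    have hVperm := PySem.List.sorted_perm (PySem.Set.ofList (ys.map f)) (fun n => n) true
    have hmemV : ∀ m, m ∈ PySem.List.sorted (PySem.Set.ofList (ys.map f)) (fun n => n) true
        ↔ m ∈ ys.map f := by
      intro m
      rw [PySem.List.mem_sorted]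
      exact PySem.Set.mem_ofList _ _
    rw [pv_insertBy_blocks f x _ ys hpV
      (fun hnot => by
        have : f x ∉ ys.map f := fun hm => hnot ((hmemV _).2 hm)
        refine List.filter_eq_nil_iff.2 ?_
        intro c hc
        simp only [beq_iff_eq]
        exact fun he => this (he ▸ List.mem_map_of_mem hc))]
    have hvs : PySem.List.sorted (PySem.Set.ofList ((ys ++ [x]).map f)) (fun n => n) true
        = pvInsDesc (f x) (PySem.List.sorted (PySem.Set.ofList (ys.map f)) (fun n => n) true) := by
      rw [List.map_append, show List.map f [x] = [f x] from rfl, pv_ofList_append_int]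
      by_cases hmem : f x ∈ PySem.Set.ofList (ys.map f)
      · have hadd : PySem.Set.add (PySem.Set.ofList (ys.map f)) (f x)
            = PySem.Set.ofList (ys.map f) := by
          simp [PySem.Set.add, hmem]
        rw [hadd, pv_insDesc_of_mem _ _ hpV
          ((hmemV _).2 ((PySem.Set.mem_ofList _ _).1 hmem))]
      · have hadd : PySem.Set.add (PySem.Set.ofList (ys.map f)) (f x)
            = PySem.Set.ofList (ys.map f) ++ [f x] := by
          simp [PySem.Set.add, hmem]
        rw [hadd]
        have hnotV : f x ∉ PySem.List.sorted (PySem.Set.ofList (ys.map f)) (fun n => n) true :=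
          fun h => hmem ((PySem.Set.mem_ofList _ _).2 ((hmemV _).1 h))
        refine PySem.List.sorted_rev_eq_of_perm_of_pairwise_gt _ _ _ ?_ ?_
        · exact (pv_insDesc_perm _ _ hnotV).trans (hVperm.append_right [f x])
        · exact pv_insDesc_pairwise _ _ hpV
    rw [hvs]

lemma pv_lastD_append (ys : List Char) (x : Char) (c : Char) :
    (pvLastD (ys ++ [x])).getD c 0 = if c = x then (ys.length : Int) else (pvLastD ys).getD c 0 := by
  unfold pvLastD
  rw [PySem.List.enumerate_append]
  simp only [PySem.List.enumerate_cons, PySem.List.enumerate_nil, List.foldl_append,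
    List.foldl_cons, List.foldl_nil]
  rw [PySem.Dict.getD_insert]
  simp only [zero_add]

lemma pv_lastA_append (ys : List Char) (x : Char) (c : Char) :
    pvGetLastIndexA (ys ++ [x]) c = if c = x then (ys.length : Int) else pvGetLastIndexA ys c := by
  unfold pvGetLastIndexA
  rcases Nat.eq_zero_or_pos ys.length with h0 | hpos
  · have hys : ys = [] := List.eq_nil_of_length_eq_zero h0
    subst hys
    have h1 : PySem.List.pyRange (((([] : List Char) ++ [x]).length : Int) - 1) 0 (-1) = [] :=
      PySem.List.pyRange_neg_one_eq_nil (by simp)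
    have h2 : PySem.List.pyRange ((([] : List Char).length : Int) - 1) 0 (-1) = [] :=
      PySem.List.pyRange_neg_one_eq_nil (by simp)
    rw [h1, h2]
    simp
  · have hlen : (((ys ++ [x]).length : Int) - 1) = (ys.length : Int) := by simp
    rw [hlen, PySem.List.pyRange_neg_one_cons (by exact_mod_cast hpos)]
    have hget : PySem.List.pyGetD (ys ++ [x]) ((ys.length : Int)) ' ' = x := by
      rw [PySem.List.pyGetD_natCast, List.getD_eq_getElem?_getD]
      simp
    have hcong : (PySem.List.pyRange ((ys.length : Int) - 1) 0 (-1)).find?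
          (fun i => PySem.List.pyGetD (ys ++ [x]) i ' ' == c)
        = (PySem.List.pyRange ((ys.length : Int) - 1) 0 (-1)).find?
          (fun i => PySem.List.pyGetD ys i ' ' == c) := by
      refine pv_find?_congr _ _ _ ?_
      intro i hi
      have hib := PySem.List.mem_pyRange_neg_one.1 hi
      have h0i : (0 : Int) ≤ i := le_of_lt hib.1
      have hilt : i < (ys.length : Int) := by omega
      rw [PySem.List.pyGetD_eq_getElem (ys ++ [x]) ' ' h0i (by simp; omega),
          PySem.List.pyGetD_eq_getElem ys ' ' h0i (by simpa using hilt)]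
      congr 1
      exact List.getElem_append_left (by omega)
    by_cases hcx : c = x
    · subst hcx
      rw [List.find?_cons_of_pos (by simp [hget])]
      simp
    · rw [List.find?_cons_of_neg (by
        intro hp
        rw [hget] at hp
        exact hcx (eq_of_beq hp).symm)]
      rw [if_neg hcx, hcong]

lemma pv_last_eq (cs : List Char) (c : Char) :
    pvGetLastIndexA cs c = (pvLastD cs).getD c 0 := by
  induction cs using List.reverseRecOn with
  | nil =>
    have h2 : PySem.List.pyRange ((([] : List Char).length : Int) - 1) 0 (-1) = [] :=
      PySem.List.pyRange_neg_one_eq_nil (by simp)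
    unfold pvGetLastIndexA pvLastD
    rw [h2]
    simp [PySem.List.enumerate_nil, PySem.Dict.getD_empty]
  | append_singleton ys x ih =>
    rw [pv_lastA_append, pv_lastD_append]
    split_ifs with h
    · rfl
    · exact ih

lemma pv_grp_run (f : Char → Int) (B : List Char) (n : Int) (hB : ∀ c ∈ B, f c = n)
    (pl : List (List Char)) (q : List Char) :
    B.foldl (pvGrpStep f) (pl ++ [q], some n) = (pl ++ [q ++ B], some n) := by
  induction B generalizing q with
  | nil => simp
  | cons b B' ih =>
    have hb : f b = n := hB b (by simp)
    simp only [List.foldl_cons, pvGrpStep, hb]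
    rw [if_neg (by simp)]
    simp only [List.dropLast_concat, List.getLastD_concat]
    have := ih (fun c hc => hB c (by simp [hc])) (q ++ [b])
    simpa [List.append_assoc] using this

lemma pv_grp_block (f : Char → Int) (B : List Char) (n : Int) (hB : ∀ c ∈ B, f c = n)
    (hne : B ≠ []) (pl : List (List Char)) (lc : Option Int) (hlc : lc ≠ some n) :
    B.foldl (pvGrpStep f) (pl, lc) = (pl ++ [B], some n) := by
  cases B with
  | nil => exact absurd rfl hne
  | cons b B' =>
    have hb : f b = n := hB b (by simp)
    simp only [List.foldl_cons, pvGrpStep, hb]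
    rw [if_pos (fun h => hlc h.symm)]
    have := pv_grp_run f B' n (fun c hc => hB c (by simp [hc])) pl [b]
    simpa using this

lemma pv_grp_blocks (f : Char → Int) (vs : List Int) (xs : List Char)
    (hp : vs.Pairwise (· > ·)) (hne : ∀ n ∈ vs, xs.filter (fun c => f c == n) ≠ [])
    (pl : List (List Char)) (lc : Option Int) (hlc : ∀ n ∈ vs, lc ≠ some n) :
    ((pvBlocks f vs xs).foldl (pvGrpStep f) (pl, lc)).1
      = pl ++ vs.map (fun n => xs.filter (fun c => f c == n)) := by
  induction vs generalizing pl lc with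
  | nil => simp [pvBlocks]
  | cons n t ih =>
    rw [pv_blocks_cons, List.foldl_append]
    rw [pv_grp_block f _ n (fun c hc => by simpa using (List.mem_filter.1 hc).2)
        (hne n (by simp)) pl lc (hlc n (by simp))]
    rw [ih (List.pairwise_cons.1 hp).2 (fun m hm => hne m (by simp [hm]))
        (pl ++ [xs.filter (fun c => f c == n)]) (some n)
        (fun m hm h => absurd (Option.some.inj h)
          (by have := (List.pairwise_cons.1 hp).1 m hm; omega))]
    simp

lemma pv_enum_map {α β : Type} (g : α → β) (vs : List α) (k : Int) :
    PySem.List.enumerate (vs.map g) k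
      = (PySem.List.enumerate vs k).map (fun p => (p.1, g p.2)) := by
  induction vs generalizing k with
  | nil => simp [PySem.List.enumerate_nil]
  | cons a t ih => simp [PySem.List.enumerate_cons, ih]

lemma pv_enum_shift {α : Type} (xs : List α) (k : Int) :
    PySem.List.enumerate xs (k + 1)
      = (PySem.List.enumerate xs k).map (fun p => (p.1 + 1, p.2)) := by
  induction xs generalizing k with
  | nil => simp [PySem.List.enumerate_nil]
  | cons a t ih => simp [PySem.List.enumerate_cons, ih]

lemma pv_foldl_enumerate_snd {α σ : Type} (xs : List α) (k : Int) (F : σ → α → σ) (init : σ) :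
    (PySem.List.enumerate xs k).foldl (fun s p => F s p.2) init = xs.foldl F init := by
  conv_rhs => rw [← PySem.List.map_snd_enumerate xs k]
  rw [List.foldl_map]

lemma pv_format_eq_render (G : List (List Char)) : pvFormatPlacementsA G = pvRender G := by
  have hsplit : (PySem.List.enumerate G 0).foldl
      (fun (st : List (List Char) × PySem.Set Char) p =>
        (st.1 ++ [pvLineA p], List.foldl PySem.Set.add st.2 p.2)) ([], ([] : PySem.Set Char))
      = ((PySem.List.enumerate G 0).foldl (fun l p => l ++ [pvLineA p]) [],
         (PySem.List.enumerate G 0).foldl (fun s p => List.foldl PySem.Set.add s p.2)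
           ([] : PySem.Set Char)) :=
    PySem.List.foldl_prod_mk (fun (l : List (List Char)) (p : Int × List Char) => l ++ [pvLineA p])
      (fun (s : PySem.Set Char) (p : Int × List Char) => List.foldl PySem.Set.add s p.2) _ _ _
  have hlines : (PySem.List.enumerate G 0).foldl (fun l p => l ++ [pvLineA p])
      ([] : List (List Char)) = [] ++ (PySem.List.enumerate G 0).map pvLineA :=
    PySem.List.foldl_append_singleton_eq_map _ _ _
  have hseen : (PySem.List.enumerate G 0).foldl (fun s p => List.foldl PySem.Set.add s p.2)
      ([] : PySem.Set Char) = G.foldl PySem.Set.update ([] : PySem.Set Char) :=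
    pv_foldl_enumerate_snd G 0 PySem.Set.update []
  have habs : pvGetAbsentDigitsA (G.foldl PySem.Set.update ([] : PySem.Set Char))
      = "0123456789".toList.filter
        (fun d => !((G.foldl PySem.Set.update ([] : PySem.Set Char)).contains d)) := by
    unfold pvGetAbsentDigitsA
    have h := PySem.List.foldl_append_if
      (fun d => !((G.foldl PySem.Set.update ([] : PySem.Set Char)).contains d))
      (fun d => d) "0123456789".toList ([] : List Char)
    simpa using h
  simp only [pvFormatPlacementsA, pvRender, hsplit, hlines, hseen, habs, List.nil_append]

lemma pv_A_eq_render (s : String) : digit_racers s = pvRender (pvGroups s.toList) := by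
  set cs := s.toList with hcs
  have h1 : digit_racers s = pvFormatPlacementsA
      ((((PySem.List.sorted (PySem.Dict.counter cs).keys
            (fun k => (PySem.Dict.counter cs).getD k 0) true).foldl
          (pvGrpStep (fun k => (PySem.Dict.counter cs).getD k 0))
          ([], (none : Option Int))).1).map
        (fun pl => PySem.List.sorted pl (fun d => pvGetLastIndexA cs d) true)) := rfl
  rw [h1, pv_format_eq_render]
  congr 1
  have hgd : (fun k => (PySem.Dict.counter cs).getD k 0)
      = (fun c => (List.count c cs : Int)) :=
    funext (fun k => PySem.Dict.getD_counter cs k)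
  rw [hgd, PySem.Dict.keys_counter,
    pv_sorted_desc_eq_blocks (fun c => (List.count c cs : Int)) (PySem.Set.ofList cs)]
  have hpV : (PySem.List.sorted (PySem.Set.ofList ((PySem.Set.ofList cs).map
      (fun c => (List.count c cs : Int)))) (fun n => n) true).Pairwise (· > ·) :=
    pv_sorted_desc_pairwise_gt _ (PySem.Set.nodup_ofList _)
  have hneV : ∀ n ∈ PySem.List.sorted (PySem.Set.ofList ((PySem.Set.ofList cs).map
      (fun c => (List.count c cs : Int)))) (fun n => n) true,
      (PySem.Set.ofList cs).filter (fun c => (List.count c cs : Int) == n) ≠ [] := by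
    intro n hn
    have hn2 : n ∈ (PySem.Set.ofList cs).map (fun c => (List.count c cs : Int)) :=
      (PySem.Set.mem_ofList _ _).1 ((PySem.List.mem_sorted _ _ _ _).1 hn)
    obtain ⟨c, hc, rfl⟩ := List.mem_map.1 hn2
    exact List.ne_nil_of_mem (List.mem_filter.2 ⟨hc, by simp⟩)
  rw [pv_grp_blocks (fun c => (List.count c cs : Int)) _ (PySem.Set.ofList cs) hpV hneV
    [] none (by simp)]
  have hlast : (fun d => pvGetLastIndexA cs d) = (fun c => (pvLastD cs).getD c 0) :=
    funext (fun d => pv_last_eq cs d)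
  rw [hlast]
  simp only [pvGroups, List.nil_append, List.map_map]
  rfl

-- str.count with a single-char needle is List.count (unfolds the fuelled substring counter)
lemma pv_count_go_cons (c x : Char) (t : List Char) (acc fuel : Nat) :
    PySem.Chars.count.go [c] (fuel + 1) (x :: t) acc
      = PySem.Chars.count.go [c] fuel t (if c == x then acc + 1 else acc) := by
  rw [PySem.Chars.count.go.eq_def]
  simp [List.isPrefixOf]
  split <;> rfl

lemma pv_count_go (c : Char) : ∀ (fuel : Nat) (l : List Char) (acc : Nat), l.length ≤ fuel →
    PySem.Chars.count.go [c] fuel l acc = acc + l.count c := by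
  intro fuel
  induction fuel with
  | zero => intro l acc h; cases l with
    | nil => rw [PySem.Chars.count.go.eq_def]; simp
    | cons x t => simp at h
  | succ n ih => intro l acc h; cases l with
    | nil => rw [PySem.Chars.count.go.eq_def]; simp
    | cons x t =>
      rw [pv_count_go_cons, ih t _ (by simp only [List.length_cons] at h; omega)]
      by_cases hc : c = x
      · simp [hc]; omega
      · simp [hc, List.count_cons]; exact fun he => hc he.symm

lemma pv_count_single (cs : List Char) (c : Char) :
    PySem.Chars.count cs [c] = List.count c cs := by
  simp [PySem.Chars.count, pv_count_go c cs.length cs 0 le_rfl]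

-- bounds of the last-occurrence value for characters of cs
lemma pv_lastD_bounds (cs : List Char) (c : Char) (hc : c ∈ cs) :
    0 ≤ (pvLastD cs).getD c 0 ∧ (pvLastD cs).getD c 0 < (cs.length : Int) := by
  induction cs using List.reverseRecOn with
  | nil => simp at hc
  | append_singleton ys x ih =>
    rw [pv_lastD_append]
    by_cases hcx : c = x
    · simp [hcx]
    · have hcy : c ∈ ys := by
        rcases List.mem_append.1 hc with h | h
        · exact h
        · simp at h; exact absurd h hcx
      have := ih hcy
      simp only [if_neg hcx, List.length_append, List.length_cons, List.length_nil]
      constructor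
      · exact this.1
      · have := this.2; push_cast; omega

-- dedup of the reversed string lists chars in strictly descending last-occurrence order
lemma pv_R_pairwise (cs : List Char) :
    (PySem.Set.ofList cs.reverse).Pairwise
      (fun a b => (pvLastD cs).getD b 0 < (pvLastD cs).getD a 0) := by
  induction cs using List.reverseRecOn with
  | nil => simp [PySem.Set.ofList]
  | append_singleton ys x ih =>
    have hrev : (ys ++ [x]).reverse = x :: ys.reverse := by simp
    have hofl : PySem.Set.ofList (x :: ys.reverse)
        = [x] ++ (PySem.Set.ofList ys.reverse).filter (fun y => !(PySem.Set.contains [x] y)) := by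
      have h1 : PySem.Set.ofList (x :: ys.reverse) = PySem.Set.update [x] ys.reverse := rfl
      rw [h1, PySem.Set.update_eq_append_filter]
    rw [hrev, hofl]
    have hmemys : ∀ b ∈ (PySem.Set.ofList ys.reverse).filter
        (fun y => !(PySem.Set.contains [x] y)), b ∈ ys ∧ b ≠ x := by
      intro b hb
      obtain ⟨hb1, hb2⟩ := List.mem_filter.1 hb
      refine ⟨List.mem_reverse.1 ((PySem.Set.mem_ofList _ _).1 hb1), ?_⟩
      intro he
      simp [PySem.Set.contains, he] at hb2
    refine List.pairwise_cons.2 ⟨?_, ?_⟩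
    · intro b hb
      obtain ⟨hbys, hbx⟩ := hmemys b hb
      rw [pv_lastD_append, pv_lastD_append, if_pos rfl, if_neg hbx]
      exact lt_of_lt_of_le (pv_lastD_bounds ys b hbys).2 (by simp)
    · have hsub : ((PySem.Set.ofList ys.reverse).filter
          (fun y => !(PySem.Set.contains [x] y))).Pairwise
          (fun a b => (pvLastD ys).getD b 0 < (pvLastD ys).getD a 0) :=
        ih.sublist List.filter_sublist
      refine hsub.imp_of_mem ?_
      intro a b ha hb hab
      rw [pv_lastD_append, pv_lastD_append, if_neg (hmemys a ha).2, if_neg (hmemys b hb).2]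
      exact hab

-- each frequency bucket of B, read off the reversed-dedup order, IS A's sorted group
lemma pv_filter_R_eq_GB (cs : List Char) (n : Int) :
    (PySem.Set.ofList cs.reverse).filter (fun c => (List.count c cs : Int) == n)
      = pvGB cs n := by
  unfold pvGB
  refine (PySem.List.sorted_rev_eq_of_perm_of_pairwise_gt _ _ _ ?_ ?_).symm
  · rw [List.perm_ext_iff_of_nodup
      ((PySem.Set.nodup_ofList cs.reverse).filter _)
      ((PySem.Set.nodup_ofList cs).filter _)]
    intro c
    simp only [List.mem_filter, PySem.Set.mem_ofList, List.mem_reverse]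
  · exact (pv_R_pairwise cs).sublist List.filter_sublist

-- rank-counting loop over a filtered countdown = map over the enumerated hits
lemma pv_rank_fold (p : Int → Bool) (g : Int → Int → List Char) :
    ∀ (L : List Int) (acc : List (List Char)) (r : Int),
    L.foldl (fun (st : List (List Char) × Int) n =>
        if p n then (st.1 ++ [g (st.2 + 1) n], st.2 + 1) else st) (acc, r)
      = (acc ++ (PySem.List.enumerate (L.filter p) (r + 1)).map (fun q => g q.1 q.2),
         r + ((L.filter p).length : Int)) := by
  intro L
  induction L with
  | nil => intro acc r; simp [PySem.List.enumerate_nil]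
  | cons n t ih =>
    intro acc r
    by_cases hp : p n
    · rw [List.foldl_cons]
      simp only [hp, if_pos]
      rw [ih (acc ++ [g (r + 1) n]) (r + 1), List.filter_cons_of_pos hp,
        PySem.List.enumerate_cons]
      simp only [List.map_cons, List.append_assoc, List.singleton_append,
        List.length_cons]
      refine Prod.ext rfl ?_
      push_cast; ring
    · rw [List.foldl_cons]
      simp only [hp, Bool.false_eq_true, if_neg, not_false_iff]
      rw [ih acc r, List.filter_cons_of_neg (by simp [hp])]

-- membership in the running union of the groups
lemma pv_mem_foldl_update (G : List (List Char)) :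
    ∀ (s : PySem.Set Char) (d : Char),
      d ∈ G.foldl PySem.Set.update s ↔ d ∈ s ∨ ∃ g ∈ G, d ∈ g := by
  induction G with
  | nil => intro s d; simp
  | cons g t ih =>
    intro s d
    rw [List.foldl_cons, ih]
    simp only [PySem.Set.mem_update, List.mem_cons]
    constructor
    · rintro (⟨h | h⟩ | ⟨g', hg', hd⟩)
      · exact Or.inl h
      · exact Or.inr ⟨g, Or.inl rfl, h⟩
      · exact Or.inr ⟨g', Or.inr hg', hd⟩
    · rintro (h | ⟨g', (rfl | hg'), hd⟩)
      · exact Or.inl (Or.inl h)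
      · exact Or.inl (Or.inr hd)
      · exact Or.inr ⟨g', hg', hd⟩

-- the ordinal dict literal is the ordinal if-chain
lemma pv_sufB_eq (r : Int) :
    pvSufB r = if r = 1 then "st".toList else if r = 2 then "nd".toList
      else if r = 3 then "rd".toList else "th".toList := by
  by_cases h1 : r = 1
  · subst h1; decide
  · by_cases h2 : r = 2
    · subst h2; decide
    · by_cases h3 : r = 3
      · subst h3; decide
      · have h : PySem.Dict.ofList [((1 : Int), "st".toList), (2, "nd".toList),
            (3, "rd".toList)]
            = PySem.Dict.mk [((1 : Int), "st".toList), (2, "nd".toList), (3, "rd".toList)] := by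
          decide
        have e1 : ((1 : Int) == r) = false := by simp [Ne.symm h1]
        have e2 : ((2 : Int) == r) = false := by simp [Ne.symm h2]
        have e3 : ((3 : Int) == r) = false := by simp [Ne.symm h3]
        unfold pvSufB
        rw [h, PySem.Dict.getD_eq_get?_getD, PySem.Dict.get?_mk_cons,
          PySem.Dict.get?_mk_cons, PySem.Dict.get?_mk_cons]
        simp [e1, e2, e3, h1, h2, h3, PySem.Dict.get?]

lemma pv_lineAB (i : Int) (g : List Char) : pvLineB (i + 1) g = pvLineA (i, g) := by
  simp only [pvLineB, pvLineA, pv_sufB_eq]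

-- B computes the same normal form
lemma pv_B_eq_render (s : String) : digit_racers_alt s = pvRender (pvGroups s.toList) := by
  set cs := s.toList with hcs
  have hadd : (fun (acc : List Char) (c : Char) => if acc.contains c then acc else acc ++ [c])
      = PySem.Set.add := by
    funext acc c
    simp [PySem.Set.add]
  have horder : cs.reverse.foldl
      (fun (acc : List Char) c => if acc.contains c then acc else acc ++ [c]) []
      = PySem.Set.ofList cs.reverse := by
    rw [hadd, ← PySem.Set.ofList_eq_foldl]
  simp only [digit_racers_alt, ← hcs, horder, pv_count_single]
  set R : List Char := PySem.Set.ofList cs.reverse with hR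
  have hRnd : R.Nodup := PySem.Set.nodup_ofList _
  have hRmem : ∀ c, c ∈ R ↔ c ∈ cs := by
    intro c
    rw [hR, PySem.Set.mem_ofList, List.mem_reverse]
  set Cd : PySem.Dict Char Int :=
    R.foldl (fun d c => d.insert c ((List.count c cs : Int))) PySem.Dict.empty with hCd
  have hitems : Cd.items = R.map (fun c => (c, (List.count c cs : Int))) := by
    rw [hCd, PySem.Dict.items_foldl_insert_fresh R (fun c => c)
      (fun c => ((List.count c cs : Int))) PySem.Dict.empty
      (fun a _ => PySem.Dict.contains_empty a) (by simpa using hRnd)]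
    simp [PySem.Dict.empty]
  have hkeys : Cd.keys = R := by
    simp [PySem.Dict.keys, hitems, Function.comp_def]
  have hknd : Cd.keys.Nodup := by rw [hkeys]; exact hRnd
  have hget : ∀ c ∈ R, Cd.getD c 0 = (List.count c cs : Int) := by
    intro c hc
    rw [PySem.Dict.getD_eq_get?_getD,
      PySem.Dict.get?_of_mem_items Cd (by rw [hitems]; exact List.mem_map_of_mem hc) hknd]
    rfl
  have hcont : ∀ d, Cd.contains d = decide (d ∈ cs) := by
    intro d
    rw [PySem.Dict.contains_eq_decide_mem_keys, hkeys]
    exact decide_eq_decide.2 (hRmem d)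
  have hvalues : Cd.values = R.map (fun c => (List.count c cs : Int)) := by
    simp only [PySem.Dict.values, hitems, List.map_map]
    rfl
  set T : Int := PySem.List.maxD Cd.values (fun v => v) 0 with hT
  have htop : ∀ n ∈ R.map (fun c => (List.count c cs : Int)), n ≤ T := by
    intro n hn
    have hne : R.map (fun c => (List.count c cs : Int)) ≠ [] := List.ne_nil_of_mem hn
    obtain ⟨m, hm⟩ : ∃ m, PySem.List.max? (R.map (fun c => (List.count c cs : Int)))
        (fun v => v) = some m := by
      cases hmm : PySem.List.max? (R.map (fun c => (List.count c cs : Int))) (fun v => v) with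
      | none => exact absurd ((PySem.List.max?_eq_none_iff _ _).1 hmm) hne
      | some m => exact ⟨m, rfl⟩
    have hle := PySem.List.max?_isMax hm n hn
    have hd : T = (PySem.List.max? (R.map (fun c => (List.count c cs : Int)))
        (fun v => v)).getD 0 := by
      rw [hT, hvalues]
      unfold PySem.List.maxD
      rfl
    rw [hd, hm]
    exact hle
  set Bk : PySem.Dict Int (List Char) :=
    R.foldl (fun d c => d.modify (Cd.getD c 0) [] (· ++ [c])) PySem.Dict.empty with hBk
  have hBk2 : Bk = (R.map (fun c => ((List.count c cs : Int), c))).foldl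
      (fun d p => d.modify p.1 [] (· ++ [p.2])) PySem.Dict.empty := by
    rw [hBk, PySem.List.foldl_congr_mem R _
      (fun d c => d.modify ((List.count c cs : Int)) [] (· ++ [c])) _
      (fun acc c hc => by rw [hget c hc])]
    rw [List.foldl_map]
  have hbkeys : Bk.keys = PySem.Set.ofList (R.map (fun c => (List.count c cs : Int))) := by
    rw [hBk, PySem.List.foldl_congr_mem R _
      (fun d c => d.modify ((List.count c cs : Int)) [] (· ++ [c])) _
      (fun acc c hc => by rw [hget c hc])]
    rw [PySem.Dict.keys_foldl_modify_key R (fun c => (List.count c cs : Int)) []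
      (fun _ c => (· ++ [c])) PySem.Dict.empty]
    rw [PySem.Dict.keys_empty, PySem.Set.update_nil_left]
  have hbget : ∀ n, Bk.getD n [] = pvGB cs n := by
    intro n
    rw [hBk2, PySem.Dict.getD_foldl_modify_append, ← pv_filter_R_eq_GB, hR]
    simp [List.filter_map, Function.comp_def]
  have hbcont : ∀ n, Bk.contains n
      = decide (n ∈ PySem.Set.ofList ((PySem.Set.ofList cs).map
          (fun c => (List.count c cs : Int)))) := by
    intro n
    rw [PySem.Dict.contains_eq_decide_mem_keys, hbkeys]
    refine decide_eq_decide.2 ?_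
    rw [PySem.Set.mem_ofList, PySem.Set.mem_ofList]
    constructor
    · rintro h
      obtain ⟨c, hc, rfl⟩ := List.mem_map.1 h
      exact List.mem_map_of_mem ((PySem.Set.mem_ofList _ _).2 ((hRmem c).1 hc))
    · rintro h
      obtain ⟨c, hc, rfl⟩ := List.mem_map.1 h
      exact List.mem_map_of_mem ((hRmem c).2 ((PySem.Set.mem_ofList _ _).1 hc))
  have hfilter : (PySem.List.pyRange T 0 (-1)).filter (fun n => Bk.contains n)
      = PySem.List.sorted (PySem.Set.ofList ((PySem.Set.ofList cs).map
          (fun c => (List.count c cs : Int)))) (fun n => n) true := by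
    refine (PySem.List.sorted_rev_eq_of_perm_of_pairwise_gt _ _ _ ?_ ?_).symm
    · rw [List.perm_ext_iff_of_nodup
        (List.Nodup.filter _ ?nd) (PySem.Set.nodup_ofList _)]
      case nd =>
        rw [PySem.List.pyRange_neg_one]
        exact List.nodup_range.map (fun a b h => by omega)
      intro n
      rw [List.mem_filter, PySem.List.mem_pyRange_neg_one, hbcont,
        decide_eq_true_eq]
      constructor
      · exact fun h => h.2
      · intro h
        refine ⟨?_, h⟩
        rw [PySem.Set.mem_ofList] at h
        obtain ⟨c, hc, rfl⟩ := List.mem_map.1 h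
        have hccs : c ∈ cs := (PySem.Set.mem_ofList _ _).1 hc
        refine ⟨by exact_mod_cast List.count_pos_iff.2 hccs, ?_⟩
        exact htop _ (List.mem_map_of_mem ((hRmem c).2 hccs))
    · refine List.Pairwise.sublist List.filter_sublist ?_
      rw [PySem.List.pyRange_neg_one]
      exact (List.pairwise_lt_range).map _ (fun h => by omega)
  rw [pv_rank_fold (fun n => Bk.contains n) (fun r n => pvLineB r (Bk.getD n [])), hfilter]
  have hmap1 : (PySem.List.enumerate (PySem.List.sorted (PySem.Set.ofList
        ((PySem.Set.ofList cs).map (fun c => (List.count c cs : Int)))) (fun n => n) true)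
        (0 + 1)).map (fun q => pvLineB q.1 (Bk.getD q.2 []))
      = (PySem.List.enumerate (pvGroups cs) 0).map pvLineA := by
    rw [pv_enum_shift, List.map_map]
    simp only [pvGroups, pv_enum_map, List.map_map]
    refine List.map_congr_left ?_
    intro q _
    simp only [Function.comp_def]
    rw [hbget, pv_lineAB]
  have hseen : ∀ d, Cd.contains d
      = ((pvGroups cs).foldl PySem.Set.update ([] : PySem.Set Char)).contains d := by
    intro d
    rw [hcont d, Bool.eq_iff_iff, decide_eq_true_eq, PySem.Set.contains_iff,
      pv_mem_foldl_update]
    constructor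
    · intro hd
      refine Or.inr ⟨pvGB cs ((List.count d cs : Int)), ?_, ?_⟩
      · simp only [pvGroups]
        refine List.mem_map_of_mem ?_
        rw [PySem.List.mem_sorted, PySem.Set.mem_ofList]
        exact List.mem_map_of_mem ((PySem.Set.mem_ofList _ _).2 hd)
      · unfold pvGB
        rw [PySem.List.mem_sorted]
        exact List.mem_filter.2 ⟨(PySem.Set.mem_ofList _ _).2 hd, by simp⟩
    · rintro (h | ⟨g, hg, hd⟩)
      · simp at h
      · simp only [pvGroups, List.mem_map] at hg
        obtain ⟨n, _, rfl⟩ := hg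
        unfold pvGB at hd
        rw [PySem.List.mem_sorted] at hd
        exact (PySem.Set.mem_ofList _ _).1 (List.mem_filter.1 hd).1
  have habs : "0123456789".toList.filter (fun d => !(Cd.contains d))
      = "0123456789".toList.filter (fun d =>
          !(((pvGroups cs).foldl PySem.Set.update ([] : PySem.Set Char)).contains d)) :=
    List.filter_congr (fun d _ => by rw [hseen d])
  simp only [pvRender, List.nil_append, hmap1, habs]

-- ===== VERDICT (by name: the statement is the Claim_ definition above) =====
theorem digit_racers_spec : Claim_equal_digit_racers := by
  intro s _
  unfold Spec_digit_racers
  rw [pv_A_eq_render, pv_B_eq_render]
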